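-- pv_equiv track=rewrite | github.com/leadlea/asd | scripts/phase3/build_asset_manifest_v0.py | choose_cejc_textgrid
-- ===== SOURCE A (Python) =====
-- from typing import Dict, List, Optional, Tuple
--
-- def choose_cejc_textgrid(lst: List[str]) -> str:
--     """
--     代表TextGrid：
--     - transUnit を優先（存在すれば）
--     - 次に -luu
--     - それ以外は先頭
--     """
--     if not lst:
--         return ""
--     s = sorted(lst)
--     for k in s:
--         if k.lower().endswith("transunit.textgrid"):
--             return k
--     for k in s:
--         if k.lower().endswith("-luu.textgrid"):
--             return k
--     return s[0]
-- ===== SOURCE B (Python) =====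
-- from typing import List
--
-- def choose_cejc_textgrid(lst: List[str]) -> str:
--     # One pass: track the lexicographic minimum of each priority tier.
--     best_t = best_l = best_a = None
--     for k in lst:
--         kl = k.lower()
--         if kl.endswith("transunit.textgrid") and (best_t is None or k < best_t):
--             best_t = k
--         if kl.endswith("-luu.textgrid") and (best_l is None or k < best_l):
--             best_l = k
--         if best_a is None or k < best_a:
--             best_a = k
--     if best_t is not None:
--         return best_t
--     if best_l is not None:
--         return best_l
--     return best_a if best_a is not None else ""
-- ===== Notes on version B (the rewrite author's own statement) =====
-- stated objective: faster
-- what changed: Replaces sort-then-scan (sorted(lst) plus two linear scans) with a single pass that tracks the lexicographic minimum of each priority tier (transUnit suffix, -luu suffix, overall).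
import Mathlib
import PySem

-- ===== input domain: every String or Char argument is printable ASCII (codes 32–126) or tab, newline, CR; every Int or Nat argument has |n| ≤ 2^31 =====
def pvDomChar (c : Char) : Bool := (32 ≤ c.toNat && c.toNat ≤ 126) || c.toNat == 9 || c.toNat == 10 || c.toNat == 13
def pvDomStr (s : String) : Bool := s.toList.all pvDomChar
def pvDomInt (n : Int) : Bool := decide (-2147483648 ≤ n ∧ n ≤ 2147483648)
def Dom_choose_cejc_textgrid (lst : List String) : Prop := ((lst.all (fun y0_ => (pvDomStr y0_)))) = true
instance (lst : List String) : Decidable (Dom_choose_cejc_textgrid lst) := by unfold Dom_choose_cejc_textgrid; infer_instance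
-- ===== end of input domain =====

-- B replaces A's sort-then-scan with a single pass tracking the lexicographic minimum of each
-- priority tier (objective: faster, O(n) instead of O(n log n)).

-- ===== PORT A =====
def choose_cejc_textgrid (lst : List String) : String :=
  if lst = [] then ""
  else
    let s := PySem.List.sorted lst (fun x => x) false
    match s.find? (fun k => PySem.Str.endswith (PySem.Str.lower k) "transunit.textgrid") with
    | some k => k
    | none =>
      match s.find? (fun k => PySem.Str.endswith (PySem.Str.lower k) "-luu.textgrid") with
      | some k => k
      | none => PySem.List.pyGetD s 0 ""

-- ===== PORT B =====
-- 'best is None or k < best' from Source B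
def pvBetter (k : String) (best : Option String) : Bool :=
  match best with
  | none => true
  | some b => decide (k < b)

def choose_cejc_textgrid_alt (lst : List String) : String :=
  let r := lst.foldl
    (fun (acc : Option String × Option String × Option String) k =>
      let kl := PySem.Str.lower k
      let bt := if PySem.Str.endswith kl "transunit.textgrid" && pvBetter k acc.1 then some k else acc.1
      let bl := if PySem.Str.endswith kl "-luu.textgrid" && pvBetter k acc.2.1 then some k else acc.2.1
      let ba := if pvBetter k acc.2.2 then some k else acc.2.2
      (bt, bl, ba))
    (none, none, none)
  match r with
  | (some t, _, _) => t
  | (none, some l, _) => l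
  | (none, none, some a) => a
  | (none, none, none) => ""

-- ===== PRECONDITION & SPEC =====
def Spec_choose_cejc_textgrid (lst : List String) (out : String) : Prop := out = choose_cejc_textgrid_alt lst
instance (lst : List String) (out : String) : Decidable (Spec_choose_cejc_textgrid lst out) := by unfold Spec_choose_cejc_textgrid; infer_instance

-- ===== CLAIM (what is proved, stated in full; the proofs are below) =====
def Claim_equal_choose_cejc_textgrid : Prop := ∀ (lst : List String), Dom_choose_cejc_textgrid lst → Spec_choose_cejc_textgrid lst (choose_cejc_textgrid lst)

-- ===== LEMMAS AND PROOFS =====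

-- running minimum as an Option-valued fold step, and the minimum of a list
def pvOptMin (acc : Option String) (k : String) : Option String :=
  match acc with
  | none => some k
  | some b => some (min b k)

def pvMinOf (xs : List String) : Option String := xs.foldl pvOptMin none

theorem pvOptMin_comm (a : Option String) (k1 k2 : String) :
    pvOptMin (pvOptMin a k1) k2 = pvOptMin (pvOptMin a k2) k1 := by
  cases a <;> simp [pvOptMin, min_assoc, min_comm k1 k2]

theorem pvMinOf_perm {l l' : List String} (h : l.Perm l') : pvMinOf l = pvMinOf l' := by
  unfold pvMinOf
  exact h.foldl_eq (rcomm := ⟨fun a k1 k2 => pvOptMin_comm a k1 k2⟩) none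

theorem foldl_min_of_le (t : List String) (a : String) (h : ∀ x ∈ t, a ≤ x) :
    t.foldl min a = a := by
  induction t with
  | nil => rfl
  | cons b t ih =>
    have hab : a ≤ b := h b (by simp)
    simp only [List.foldl_cons, min_eq_left hab]
    exact ih (fun x hx => h x (by simp [hx]))

theorem foldl_pvOptMin_some (t : List String) (a : String) :
    t.foldl pvOptMin (some a) = some (t.foldl min a) := by
  induction t generalizing a with
  | nil => rfl
  | cons b t ih => simp [pvOptMin, ih]

theorem pvMinOf_of_pairwise (l : List String) (h : l.Pairwise (· ≤ ·)) :
    pvMinOf l = l.head? := by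
  cases l with
  | nil => rfl
  | cons a t =>
    have hle : ∀ x ∈ t, a ≤ x := (List.pairwise_cons.mp h).1
    show t.foldl pvOptMin (some a) = some a
    rw [foldl_pvOptMin_some, foldl_min_of_le t a hle]

-- A's scan of the sorted list: first match = minimum of the matching elements
theorem find?_sorted_eq (lst : List String) (p : String → Bool) :
    (PySem.List.sorted lst (fun x => x) false).find? p = pvMinOf (lst.filter p) := by
  set s := PySem.List.sorted lst (fun x => x) false with hs
  have hpair : (s.filter p).Pairwise (fun a b => a ≤ b) :=
    (PySem.List.sorted_pairwise (xs := lst) (key := fun x => x)).filter p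
  have hperm : (s.filter p).Perm (lst.filter p) :=
    (PySem.List.sorted_perm (xs := lst) (key := fun x => x) (rev := false)).filter p
  calc s.find? p = (s.filter p).head? := (List.head?_filter ..).symm
    _ = pvMinOf (s.filter p) := (pvMinOf_of_pairwise _ hpair).symm
    _ = pvMinOf (lst.filter p) := pvMinOf_perm hperm

-- B's guarded update is 'if p k then pvOptMin acc k else acc'
theorem step_eq (p : String → Bool) (acc : Option String) (k : String) :
    (if p k && pvBetter k acc then some k else acc)
      = if p k then pvOptMin acc k else acc := by
  cases acc with
  | none => cases p k <;> simp [pvBetter, pvOptMin]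
  | some b =>
    cases p k
    · simp
    · simp only [Bool.true_and, if_true, pvBetter, pvOptMin]
      by_cases hkb : k < b
      · rw [if_pos (decide_eq_true hkb), min_eq_right hkb.le]
      · rw [if_neg (by simpa using hkb), min_eq_left (not_lt.mp hkb)]

theorem foldl_step_eq (lst : List String) (p : String → Bool) :
    lst.foldl (fun acc k => if p k && pvBetter k acc then some k else acc) none
      = pvMinOf (lst.filter p) := by
  have h1 : lst.foldl (fun acc k => if p k && pvBetter k acc then some k else acc) none
      = lst.foldl (fun acc k => if p k then pvOptMin acc k else acc) none := by
    congr 1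
    funext acc k
    exact step_eq p acc k
  rw [h1, PySem.List.foldl_if_eq_foldl_filter]
  rfl

def pvP1 : String → Bool := fun k => PySem.Str.endswith (PySem.Str.lower k) "transunit.textgrid"
def pvP2 : String → Bool := fun k => PySem.Str.endswith (PySem.Str.lower k) "-luu.textgrid"

-- B's triple fold splits into three independent folds
theorem foldl_triple (lst : List String) (f g h : Option String → String → Option String)
    (a b c : Option String) :
    lst.foldl (fun acc k => (f acc.1 k, g acc.2.1 k, h acc.2.2 k)) (a, b, c)
      = (lst.foldl f a, lst.foldl g b, lst.foldl h c) := by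
  induction lst generalizing a b c with
  | nil => rfl
  | cons x t ih => simp [ih]

-- B's triple fold splits into three independent folds
theorem alt_fold_eq (lst : List String) :
    lst.foldl
      (fun (acc : Option String × Option String × Option String) k =>
        let kl := PySem.Str.lower k
        let bt := if PySem.Str.endswith kl "transunit.textgrid" && pvBetter k acc.1 then some k else acc.1
        let bl := if PySem.Str.endswith kl "-luu.textgrid" && pvBetter k acc.2.1 then some k else acc.2.1
        let ba := if pvBetter k acc.2.2 then some k else acc.2.2
        (bt, bl, ba))
      (none, none, none)
    = (pvMinOf (lst.filter pvP1), pvMinOf (lst.filter pvP2), pvMinOf lst) := by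
  have h := foldl_triple lst
    (fun acc k => if pvP1 k && pvBetter k acc then some k else acc)
    (fun acc k => if pvP2 k && pvBetter k acc then some k else acc)
    (fun acc k => if pvBetter k acc then some k else acc)
    none none none
  refine Eq.trans h ?_
  rw [foldl_step_eq lst pvP1, foldl_step_eq lst pvP2]
  have h3 : lst.foldl (fun (acc : Option String) k => if pvBetter k acc then some k else acc) none
      = pvMinOf lst := by
    have := foldl_step_eq lst (fun _ => true)
    simpa using this
  rw [h3]

theorem pvMinOf_cons_isSome (a : String) (t : List String) : (pvMinOf (a :: t)).isSome := by
  simp [pvMinOf, foldl_pvOptMin_some, pvOptMin]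

theorem main_eq (lst : List String) : choose_cejc_textgrid lst = choose_cejc_textgrid_alt lst := by
  cases lst with
  | nil => rfl
  | cons a t =>
    unfold choose_cejc_textgrid choose_cejc_textgrid_alt
    rw [alt_fold_eq]
    simp only [reduceCtorEq, if_false]
    unfold pvP1 pvP2
    rw [find?_sorted_eq, find?_sorted_eq]
    cases h1 : pvMinOf ((a :: t).filter (fun k => PySem.Str.endswith (PySem.Str.lower k) "transunit.textgrid")) with
    | some k => rfl
    | none =>
      cases h2 : pvMinOf ((a :: t).filter (fun k => PySem.Str.endswith (PySem.Str.lower k) "-luu.textgrid")) with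
      | some k => rfl
      | none =>
        cases h0 : pvMinOf (a :: t) with
        | none => exact absurd (congrArg Option.isSome h0) (by simp [pvMinOf_cons_isSome])
        | some m =>
          -- fallback: s[0] is the head of the sorted list, which is the minimum
          have hpair : (PySem.List.sorted (a :: t) (fun x => x) false).Pairwise (fun a b => a ≤ b) :=
            PySem.List.sorted_pairwise (xs := a :: t) (key := fun x => x)
          have hperm : (PySem.List.sorted (a :: t) (fun x => x) false).Perm (a :: t) :=
            PySem.List.sorted_perm (xs := a :: t) (key := fun x => x) (rev := false)
          have hhead : (PySem.List.sorted (a :: t) (fun x => x) false).head? = some m := by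
            rw [← pvMinOf_of_pairwise _ hpair, pvMinOf_perm hperm, h0]
          simp only [PySem.List.pyGetD_zero, List.getD_eq_getElem?_getD, ← List.head?_eq_getElem?, hhead]
          rfl

-- ===== VERDICT (by name: the statement is the Claim_ definition above) =====
theorem choose_cejc_textgrid_spec : Claim_equal_choose_cejc_textgrid := by
  intro lst _
  exact main_eq lst
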